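-- pv_equiv track=rewrite | github.com/wqw547243068/wangqiwen | cws.py | dump_example
-- ===== SOURCE A (Python) =====
-- def dump_example(x,y) : # 根据x，y得到词数组
--     cache=''
--     words=[]
--     for i in range(len(x)) :
--         cache+=x[i]
--         if y[i]==2 or y[i]==3 :
--             words.append(cache)
--             cache=''
--     if cache : words.append(cache)
--     return words
-- ===== SOURCE B (Python) =====
-- def dump_example(x, y):
--     # two-pass: collect boundary indices, then cut x into slices between them
--     bounds = [i for i in range(len(x)) if y[i] == 2 or y[i] == 3]
--     words = []
--     prev = -1
--     for b in bounds:
--         words.append(x[prev + 1:b + 1])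
--         prev = b
--     rem = x[prev + 1:]
--     if rem:
--         words.append(rem)
--     return words
-- ===== Notes on version B (the rewrite author's own statement) =====
-- stated objective: alternative
-- what changed: Replaced the single-pass char-by-char cache accumulation with a two-pass decomposition: first collect the boundary indices where y[i] is 2 or 3, then cut x into slices between consecutive boundaries (plus a non-empty trailing remainder).
import Mathlib
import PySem

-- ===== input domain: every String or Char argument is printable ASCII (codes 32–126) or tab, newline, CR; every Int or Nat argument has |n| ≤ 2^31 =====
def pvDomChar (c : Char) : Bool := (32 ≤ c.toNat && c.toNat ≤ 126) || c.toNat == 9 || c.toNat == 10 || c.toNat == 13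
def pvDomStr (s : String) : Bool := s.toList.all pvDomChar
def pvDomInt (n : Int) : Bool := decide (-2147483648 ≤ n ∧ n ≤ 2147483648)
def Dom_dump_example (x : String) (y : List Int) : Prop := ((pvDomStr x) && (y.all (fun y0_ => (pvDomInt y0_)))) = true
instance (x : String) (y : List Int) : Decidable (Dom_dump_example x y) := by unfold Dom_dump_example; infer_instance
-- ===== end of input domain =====

-- B replaces A's char-by-char cache accumulation by a two-pass decomposition
-- (collect boundary indices, then cut x into slices between them); objective: alternative.
-- Both ports work on the string's char list and wrap the finished words with String.ofList.

-- ===== PORT A =====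
-- the for-loop over i in range(len(x)); cache holds the pending chars, words the output so far
def dumpLoopA : List Char → List Int → List Char → List (List Char) → List (List Char)
  | [], _, cache, words => if cache ≠ [] then words ++ [cache] else words
  | _ :: _, [], _, words => words   -- Python raises IndexError here (y shorter than x); excluded by Pre_
  | c :: cs, t :: ts, cache, words =>
    if t = 2 ∨ t = 3 then dumpLoopA cs ts [] (words ++ [cache ++ [c]])
    else dumpLoopA cs ts (cache ++ [c]) words

def dump_example (x : String) (y : List Int) : List String :=
  (dumpLoopA x.toList y [] []).map String.ofList

-- ===== PORT B =====
-- the second pass of Source B: for b in bounds append x[prev+1:b+1]; then the remainder x[prev+1:]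
def dumpSegsB (cs : List Char) : List Nat → Int → List (List Char) → List (List Char)
  | [], prev, words =>
      let rem := PySem.List.slice cs (some (prev + 1)) none
      if rem ≠ [] then words ++ [rem] else words
  | b :: bs, prev, words =>
      dumpSegsB cs bs (b : Int) (words ++ [PySem.List.slice cs (some (prev + 1)) (some ((b : Int) + 1))])

-- first pass: bounds = [i for i in range(len(x)) if y[i] == 2 or y[i] == 3]
-- (the .getD 0 is never reached under Pre_, where every index i < len x is in range for y)
def dump_example_alt (x : String) (y : List Int) : List String :=
  let cs := x.toList
  let bounds := (List.range cs.length).filter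
    (fun (i : Nat) => (PySem.List.pyGet? y (i : Int)).getD 0 == 2 || (PySem.List.pyGet? y (i : Int)).getD 0 == 3)
  (dumpSegsB cs bounds (-1) []).map String.ofList

-- ===== PRECONDITION & SPEC =====
-- A raises IndexError on y[i] exactly when y is shorter than x
def Pre_dump_example (x : String) (y : List Int) : Prop := x.toList.length ≤ y.length
instance (x : String) (y : List Int) : Decidable (Pre_dump_example x y) := by
  unfold Pre_dump_example; infer_instance
def pvWitness_dump_example : String × List Int := ("abc", [1, 2, 3])

def Spec_dump_example (x : String) (y : List Int) (out : List String) : Prop := out = dump_example_alt x y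
instance (x : String) (y : List Int) (out : List String) : Decidable (Spec_dump_example x y out) := by unfold Spec_dump_example; infer_instance

-- ===== CLAIM (what is proved, stated in full; the proofs are below) =====
def Claim_equal_dump_example : Prop := ∀ (x : String) (y : List Int), Dom_dump_example x y → Pre_dump_example x y → Spec_dump_example x y (dump_example x y)

-- ===== LEMMAS AND PROOFS =====

-- pull the accumulator out of A's loop
theorem dumpLoopA_acc (cs : List Char) : ∀ (ts : List Int) (cache : List Char) (words : List (List Char)),
    dumpLoopA cs ts cache words = words ++ dumpLoopA cs ts cache [] := by
  induction cs with
  | nil => intro ts cache words; simp [dumpLoopA]; split <;> simp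
  | cons c cs ih =>
    intro ts cache words
    cases ts with
    | nil => simp [dumpLoopA]
    | cons t ts =>
      simp only [dumpLoopA]
      split
      · rw [ih ts [] (words ++ _), ih ts [] ([] ++ _)]; simp
      · exact ih ts (cache ++ [c]) words

-- pull the accumulator out of B's second pass
theorem dumpSegsB_acc (cs : List Char) (bs : List Nat) : ∀ (prev : Int) (words : List (List Char)),
    dumpSegsB cs bs prev words = words ++ dumpSegsB cs bs prev [] := by
  induction bs with
  | nil => intro prev words; simp [dumpSegsB]; split <;> simp
  | cons b bs ih =>
    intro prev words
    simp only [dumpSegsB]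
    rw [ih (b : Int) (words ++ _), ih (b : Int) ([] ++ _)]
    simp

-- slices of c::cs with both indices shifted by one are slices of cs
theorem slice_shift (c : Char) (cs : List Char) (a b : Int) (ha : 0 ≤ a) (hb : 0 ≤ b) :
    PySem.List.slice (c :: cs) (some (a + 1)) (some (b + 1)) = PySem.List.slice cs (some a) (some b) := by
  rw [PySem.List.slice_toNat _ (by omega) (by omega), PySem.List.slice_toNat _ ha hb]
  have h1 : (a + 1).toNat = a.toNat + 1 := by omega
  have h2 : (b + 1).toNat = b.toNat + 1 := by omega
  simp [h1, h2]

theorem slice_from_shift (c : Char) (cs : List Char) (a : Int) (ha : 0 ≤ a) :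
    PySem.List.slice (c :: cs) (some (a + 1)) none = PySem.List.slice cs (some a) none := by
  rw [PySem.List.slice_from _ (by omega), PySem.List.slice_from _ ha]
  have h1 : (a + 1).toNat = a.toNat + 1 := by omega
  simp [h1]

-- shifted bounds over c::cs behave like the original bounds over cs
theorem dumpSegsB_shift (c : Char) (cs : List Char) : ∀ (bs : List Nat) (p : Int), -1 ≤ p →
    dumpSegsB (c :: cs) (bs.map Nat.succ) (p + 1) [] = dumpSegsB cs bs p [] := by
  intro bs
  induction bs with
  | nil =>
    intro p hp
    simp only [List.map_nil, dumpSegsB]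
    rw [slice_from_shift c cs (p + 1) (by omega)]
  | cons b bs ih =>
    intro p hp
    simp only [List.map_cons, dumpSegsB]
    rw [dumpSegsB_acc, dumpSegsB_acc cs]
    have hb : ((Nat.succ b : Nat) : Int) = (b : Int) + 1 := by push_cast; ring
    rw [hb, slice_shift c cs (p + 1) ((b : Int) + 1) (by omega) (by omega)]
    rw [ih ((b : Int)) (by omega)]

-- attachSeg s l prepends the pending chars s to the first word of l (a new word if l is empty and s is not)
def attachSeg : List Char → List (List Char) → List (List Char)
  | s, [] => if s ≠ [] then [s] else []
  | s, w :: ws => (s ++ w) :: ws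

theorem attachSeg_assoc (s s' : List Char) (l : List (List Char)) :
    attachSeg s (attachSeg s' l) = attachSeg (s ++ s') l := by
  cases l with
  | nil =>
    by_cases h : s' = []
    · subst h; simp [attachSeg]
    · simp [attachSeg, h]
  | cons w ws => simp [attachSeg]

-- prepending one char on B's side
theorem dumpSegsB_attach (c : Char) (cs : List Char) (bs : List Nat) :
    dumpSegsB (c :: cs) (bs.map Nat.succ) (-1) [] = attachSeg [c] (dumpSegsB cs bs (-1) []) := by
  cases bs with
  | nil =>
    simp only [List.map_nil, dumpSegsB]
    have h0 : (-1 : Int) + 1 = ((0 : Nat) : Int) := by norm_num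
    rw [h0, PySem.List.slice_from_natCast, PySem.List.slice_from_natCast]
    simp only [List.drop_zero]
    by_cases h : cs = [] <;> simp [attachSeg, h]
  | cons b bs =>
    simp only [List.map_cons, dumpSegsB]
    rw [dumpSegsB_acc, dumpSegsB_acc cs]
    have hb : ((Nat.succ b : Nat) : Int) = (b : Int) + 1 := by push_cast; ring
    have hsh := dumpSegsB_shift c cs bs ((b : Int)) (by omega)
    have h0 : (-1 : Int) + 1 = ((0 : Nat) : Int) := by norm_num
    rw [hb, h0]
    rw [PySem.List.slice_toNat _ (by omega) (by omega),
        PySem.List.slice_toNat _ (by omega) (by omega)]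
    have h1 : ((b : Int) + 1 + 1).toNat = b + 2 := by omega
    have h2 : ((b : Int) + 1).toNat = b + 1 := by omega
    have h3 : (((0 : Nat) : Int)).toNat = 0 := by omega
    simp only [h1, h2, h3, List.drop_zero, Nat.sub_zero]
    rw [hsh]
    simp [attachSeg, List.take_succ_cons]

-- prepending pending chars on A's side (needs y to reach the end of x, as Pre_ guarantees)
theorem dumpLoopA_attach (cs : List Char) : ∀ (ts : List Int) (cache : List Char),
    cs.length ≤ ts.length →
    dumpLoopA cs ts cache [] = attachSeg cache (dumpLoopA cs ts [] []) := by
  induction cs with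
  | nil =>
    intro ts cache _
    by_cases h : cache = [] <;> simp [dumpLoopA, attachSeg, h]
  | cons c cs ih =>
    intro ts cache hlen
    cases ts with
    | nil => simp at hlen
    | cons t ts =>
      have hlen' : cs.length ≤ ts.length := by simpa using hlen
      simp only [dumpLoopA]
      split
      · rw [dumpLoopA_acc cs ts [] ([] ++ [cache ++ [c]]), dumpLoopA_acc cs ts [] ([] ++ [[] ++ [c]])]
        simp [attachSeg]
      · rw [ih ts (cache ++ [c]) hlen', ih ts ([] ++ [c]) hlen', attachSeg_assoc]
        simp

-- the main equivalence on char lists; the filter predicate is B's boundary test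
theorem main_eq (cs : List Char) : ∀ (ts : List Int), cs.length ≤ ts.length →
    dumpLoopA cs ts [] [] =
      dumpSegsB cs ((List.range cs.length).filter
        (fun (i : Nat) => (PySem.List.pyGet? ts (i : Int)).getD 0 == 2 ||
                          (PySem.List.pyGet? ts (i : Int)).getD 0 == 3)) (-1) [] := by
  induction cs with
  | nil => intro ts _; simp [dumpLoopA, dumpSegsB, PySem.List.slice]
  | cons c cs ih =>
    intro ts hlen
    cases ts with
    | nil => simp at hlen
    | cons t ts =>
      have hlen' : cs.length ≤ ts.length := by simpa using hlen
      have hfilter : (List.range (c :: cs).length).filter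
            (fun (i : Nat) => (PySem.List.pyGet? (t :: ts) (i : Int)).getD 0 == 2 ||
                      (PySem.List.pyGet? (t :: ts) (i : Int)).getD 0 == 3) =
          (if ((PySem.List.pyGet? (t :: ts) ((0 : Nat) : Int)).getD 0 == 2 ||
               (PySem.List.pyGet? (t :: ts) ((0 : Nat) : Int)).getD 0 == 3) then [0] else []) ++
          ((List.range cs.length).filter
            (fun (i : Nat) => (PySem.List.pyGet? ts (i : Int)).getD 0 == 2 ||
                      (PySem.List.pyGet? ts (i : Int)).getD 0 == 3)).map Nat.succ := by
        rw [List.length_cons, List.range_succ_eq_map, List.filter_cons, List.filter_map]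
        have hcongr : List.filter
              ((fun (i : Nat) => (PySem.List.pyGet? (t :: ts) (i : Int)).getD 0 == 2 ||
                                 (PySem.List.pyGet? (t :: ts) (i : Int)).getD 0 == 3) ∘ Nat.succ)
              (List.range cs.length) =
            List.filter (fun (i : Nat) => (PySem.List.pyGet? ts (i : Int)).getD 0 == 2 ||
                                          (PySem.List.pyGet? ts (i : Int)).getD 0 == 3)
              (List.range cs.length) := by
          apply List.filter_congr
          intro i _
          show ((PySem.List.pyGet? (t :: ts) ((Nat.succ i : Nat) : Int)).getD 0 == 2 ||
                (PySem.List.pyGet? (t :: ts) ((Nat.succ i : Nat) : Int)).getD 0 == 3) = _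
          rw [PySem.List.pyGet?_natCast, PySem.List.pyGet?_natCast]
          simp
        rw [hcongr]
        split <;> rfl
      have hget0 : (PySem.List.pyGet? (t :: ts) ((0 : Nat) : Int)).getD 0 = t := by
        simp [PySem.List.pyGet?_natCast]
      simp only [dumpLoopA]
      by_cases hflush : t = 2 ∨ t = 3
      · have hb : ((PySem.List.pyGet? (t :: ts) ((0 : Nat) : Int)).getD 0 == 2 ||
                   (PySem.List.pyGet? (t :: ts) ((0 : Nat) : Int)).getD 0 == 3) = true := by
          rw [hget0]; rcases hflush with h | h <;> simp [h]
        rw [if_pos hflush, hfilter, hb]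
        rw [show (if (true = true) then [0] else ([] : List Nat)) = [0] from rfl, List.singleton_append]
        simp only [dumpSegsB]
        rw [dumpSegsB_acc]
        have hsh := dumpSegsB_shift c cs ((List.range cs.length).filter
            (fun (i : Nat) => (PySem.List.pyGet? ts (i : Int)).getD 0 == 2 ||
                              (PySem.List.pyGet? ts (i : Int)).getD 0 == 3)) (-1) (by omega)
        rw [dumpLoopA_acc cs ts [] _, ih ts hlen']
        rw [PySem.List.slice_toNat _ (by omega) (by omega)]
        have h1 : ((-1 : Int) + 1).toNat = 0 := by omega
        have h2 : (((0 : Nat) : Int) + 1).toNat = 1 := by omega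
        simp only [h1, h2, List.drop_zero, Nat.sub_zero, List.take_succ_cons, List.take_zero]
        rw [show ((0 : Nat) : Int) = (-1 : Int) + 1 from by norm_num, hsh]
        simp
      · have hb : ((PySem.List.pyGet? (t :: ts) ((0 : Nat) : Int)).getD 0 == 2 ||
                   (PySem.List.pyGet? (t :: ts) ((0 : Nat) : Int)).getD 0 == 3) = false := by
          rw [hget0]; push_neg at hflush
          simp [hflush.1, hflush.2]
        rw [if_neg hflush, hfilter, hb]
        rw [show (if (false = true) then [0] else ([] : List Nat)) = [] from rfl]
        simp only [List.nil_append]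
        rw [dumpSegsB_attach, dumpLoopA_attach cs ts [c] hlen', ← ih ts hlen']

-- ===== VERDICT (by name: the statement is the Claim_ definition above) =====
theorem dump_example_spec : Claim_equal_dump_example := by
  intro x y _ hpre
  unfold Spec_dump_example dump_example dump_example_alt
  rw [main_eq x.toList y hpre]
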